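-- pv_equiv track=rewrite | github.com/SavageCowsea/Analysis-and-design-of-algorithms | listaRepro.py | awaitingtime
-- ===== SOURCE A (Python) =====
-- import itertools
-- from functools import reduce
--
-- def combination(arr, time, n, no):
--     all_combinations = itertools.combinations(arr, n)
--     all_combinations = list(filter(lambda x: sum(x) <= time, all_combinations))
--     if (len(all_combinations) != 0):
--         return time-sum(reduce(lambda a, b: a if time-sum(a) <= time -
--                                sum(b) else b, all_combinations))
--     else:
--         return no
--
-- def awaitingtime(songs, time):
--     ans = -1
--     if len(songs) == 0:
--         return time
--     elif sum(songs) == time or time in songs: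
--         return 0
--     elif sum(songs) < time:
--         return time-sum(songs)
--     elif sum(songs) > time:
--         n = 1
--         while(ans != 0 and n <= len(songs)):
--             ans = combination(songs, time, n, ans)
--             n += 1
--         return ans
-- ===== SOURCE B (Python) =====
-- def awaitingtime(songs, time):
--     if len(songs) == 0:
--         return time
--     total = sum(songs)
--     if total == time or time in songs:
--         return 0
--     if total < time:
--         return time - total
--     # total > time: per-cardinality reachable subset sums, built once by a knapsack-style DP
--     m = len(songs)
--     sums = [set() for _ in range(m + 1)]
--     sums[0].add(0)
--     for x in songs:
--         for k in range(m - 1, -1, -1):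
--             if sums[k]:
--                 sums[k + 1].update(v + x for v in sums[k])
--     ans = -1
--     for n in range(1, m + 1):
--         feas = [v for v in sums[n] if v <= time]
--         if feas:
--             ans = time - max(feas)
--             if ans == 0:
--                 break
--     return ans
-- ===== Notes on version B (the rewrite author's own statement) =====
-- stated objective: alternative
-- what changed: B replaces A's per-size itertools.combinations enumeration with filter+reduce (which re-sums every tuple repeatedly) by one knapsack-style DP pass that builds the sets of reachable subset sums per cardinality once, then reads the maximal feasible sum per size from those sets; it avoids materialising the combination tuples but its worst case is still exponential in the number of distinct subset sums.
import Mathlib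
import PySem

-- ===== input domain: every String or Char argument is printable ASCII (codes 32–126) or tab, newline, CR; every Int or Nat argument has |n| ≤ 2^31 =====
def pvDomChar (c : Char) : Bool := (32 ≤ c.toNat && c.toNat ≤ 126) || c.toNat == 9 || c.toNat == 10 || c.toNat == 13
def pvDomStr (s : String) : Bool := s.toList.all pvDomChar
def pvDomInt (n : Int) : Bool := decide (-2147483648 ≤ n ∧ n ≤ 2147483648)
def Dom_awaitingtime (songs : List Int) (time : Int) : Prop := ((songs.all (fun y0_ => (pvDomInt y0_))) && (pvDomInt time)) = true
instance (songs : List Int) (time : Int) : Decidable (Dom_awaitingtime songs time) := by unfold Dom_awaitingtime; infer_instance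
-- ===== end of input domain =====

-- B replaces A's per-size itertools.combinations enumeration + reduce (recomputing sums) by a single
-- knapsack-style DP that builds the per-cardinality sets of reachable subset sums once; same return value.


-- ===== PORT A =====
def pvCombination (arr : List Int) (time : Int) (n : Nat) (no : Int) : Int :=
  let allC := (PySem.List.combinations arr n).filter (fun x => decide (x.sum ≤ time))
  match allC with
  | [] => no
  | h :: t => time - (t.foldl (fun a b => if time - a.sum ≤ time - b.sum then a else b) h).sum

def pvLoopA (songs : List Int) (time : Int) : Nat → Int → Nat → Int
  | 0, ans, _ => ans
  | fuel+1, ans, n =>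
    if ans ≠ 0 ∧ n ≤ songs.length then
      pvLoopA songs time fuel (pvCombination songs time n ans) (n+1)
    else ans

def awaitingtime (songs : List Int) (time : Int) : Int :=
  if songs.length = 0 then time
  else if songs.sum = time ∨ time ∈ songs then 0
  else if songs.sum < time then time - songs.sum
  -- Python's last branch 'elif sum(songs) > time' is the only remaining case here (trichotomy)
  else pvLoopA songs time (songs.length + 1) (-1) 1

-- ===== PORT B =====
-- for k in range(m-1, -1, -1): if sums[k]: sums[k+1].update(v + x for v in sums[k])
-- (k and k+1 are in-range list indices here, so plain set/getD indexing is exact)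
def pvDpStep (m : Nat) (sums : List (PySem.Set Int)) (x : Int) : List (PySem.Set Int) :=
  (PySem.List.pyRange ((m : Int) - 1) (-1) (-1)).foldl (fun sums k =>
    let sk := sums.getD k.toNat PySem.Set.empty
    if sk = [] then sums
    else sums.set (k.toNat + 1)
      (sk.foldl (fun s v => PySem.Set.add s (v + x)) (sums.getD (k.toNat + 1) PySem.Set.empty)))
    sums

-- for n in range(1, m+1): feas = [v for v in sums[n] if v <= time]; if feas: ans = time - max(feas); break on 0
def pvNLoopB (time : Int) (sums : List (PySem.Set Int)) : Nat → Int → Nat → Int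
  | 0, ans, _ => ans
  | fuel+1, ans, n =>
    let feas := (sums.getD n PySem.Set.empty).filter (fun v => decide (v ≤ time))
    match PySem.List.max? feas (fun v => v) with
    | none => pvNLoopB time sums fuel ans (n+1)
    | some mx =>
      if time - mx = 0 then time - mx
      else pvNLoopB time sums fuel (time - mx) (n+1)

def awaitingtime_alt (songs : List Int) (time : Int) : Int :=
  if songs.length = 0 then time
  else
    let total := songs.sum
    if total = time ∨ time ∈ songs then 0
    else if total < time then time - total
    else
      let m := songs.length
      let sums0 : List (PySem.Set Int) := List.replicate (m + 1) PySem.Set.empty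
      let sums1 := sums0.set 0 (PySem.Set.add (sums0.getD 0 PySem.Set.empty) 0)
      let sumsF := songs.foldl (pvDpStep m) sums1
      pvNLoopB time sumsF m (-1) 1

-- ===== PRECONDITION & SPEC =====
def Spec_awaitingtime (songs : List Int) (time : Int) (out : Int) : Prop := out = awaitingtime_alt songs time
instance (songs : List Int) (time : Int) (out : Int) : Decidable (Spec_awaitingtime songs time out) := by unfold Spec_awaitingtime; infer_instance

-- ===== CLAIM (what is proved, stated in full; the proofs are below) =====
def Claim_equal_awaitingtime : Prop := ∀ (songs : List Int) (time : Int), Dom_awaitingtime songs time → Spec_awaitingtime songs time (awaitingtime songs time)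

-- ===== LEMMAS AND PROOFS =====

-- sums of the size-k combinations, as a membership predicate
def pvSC (l : List Int) (k : Nat) (v : Int) : Prop :=
  v ∈ (PySem.List.combinations l k).map List.sum

lemma pvSC_iff (l : List Int) (k : Nat) (v : Int) :
    pvSC l k v ↔ ∃ c : List Int, c.Sublist l ∧ c.length = k ∧ c.sum = v := by
  simp only [pvSC, List.mem_map, PySem.List.mem_combinations_iff]
  constructor
  · rintro ⟨c, ⟨hs, hl⟩, hv⟩; exact ⟨c, hs, hl, hv⟩
  · rintro ⟨c, hs, hl, hv⟩; exact ⟨c, ⟨hs, hl⟩, hv⟩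

lemma pvSC_snoc (p : List Int) (x : Int) (k : Nat) (v : Int) :
    pvSC (p ++ [x]) k v ↔ pvSC p k v ∨ (1 ≤ k ∧ pvSC p (k - 1) (v - x)) := by
  rw [pvSC_iff, pvSC_iff, pvSC_iff]
  constructor
  · rintro ⟨c, hs, hl, hv⟩
    rcases List.sublist_append_iff.mp hs with ⟨l₁, l₂, rfl, h1, h2⟩
    rcases List.sublist_singleton.mp h2 with h2' | h2'
    · subst h2'; left; exact ⟨l₁, h1, by simpa using hl, by simpa using hv⟩
    · subst h2'
      have hk : 1 ≤ k := by simp at hl; omega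
      refine Or.inr ⟨hk, l₁, h1, by simp at hl ⊢; omega, ?_⟩
      simp at hv ⊢; omega
  · rintro (⟨c, hs, hl, hv⟩ | ⟨hk, c, hs, hl, hv⟩)
    · exact ⟨c, hs.trans (List.sublist_append_left p [x]), hl, hv⟩
    · refine ⟨c ++ [x], hs.append (List.Sublist.refl [x]), by simp [hl]; omega, by simp [hv]⟩

-- descending index list [j-1, …, 0]
def pvDesc : Nat → List Int
  | 0 => []
  | j+1 => (j : Int) :: pvDesc j

lemma pv_range_map : ∀ m : Nat, (List.range m).map (fun k : Nat => (m : Int) - 1 - k) = pvDesc m := by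
  intro m
  induction m with
  | zero => rfl
  | succ j ih =>
    rw [List.range_succ_eq_map]
    show _ :: _ = ((j : Int) :: pvDesc j)
    congr 1
    · push_cast; ring
    · rw [← ih, List.map_map]
      apply List.map_congr_left
      intro a _
      simp only [Function.comp_apply]
      push_cast; ring

lemma pvRange_desc (m : Nat) : PySem.List.pyRange ((m : Int) - 1) (-1) (-1) = pvDesc m := by
  cases m with
  | zero => rfl
  | succ j =>
    rw [PySem.List.pyRange]
    have h1 : (-1 : Int) ≠ 0 := by norm_num
    have h2 : ¬ (0 : Int) < -1 := by norm_num
    have h3 : (-1 : Int) < ((j + 1 : Nat) : Int) - 1 := by push_cast; omega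
    simp only [if_neg h1, if_neg (by norm_num : ¬ ((0:Int) < -1)), if_pos h3]
    have hc : ((((j + 1 : Nat) : Int) - 1 - -1 + - -1 - 1) / -(-1)).toNat = j + 1 := by
      push_cast; norm_num
    rw [hc, ← pv_range_map (j + 1)]
    apply List.map_congr_left
    intro a _
    push_cast; ring

-- the body of B's inner k-loop
def pvDpBody (x : Int) (sums : List (PySem.Set Int)) (k : Int) : List (PySem.Set Int) :=
  let sk := sums.getD k.toNat PySem.Set.empty
  if sk = [] then sums
  else sums.set (k.toNat + 1)
    (sk.foldl (fun s v => PySem.Set.add s (v + x)) (sums.getD (k.toNat + 1) PySem.Set.empty))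

lemma pvDpStep_eq (m : Nat) (sums : List (PySem.Set Int)) (x : Int) :
    pvDpStep m sums x = (pvDesc m).foldl (pvDpBody x) sums := by
  rw [pvDpStep, pvRange_desc]; rfl

lemma pv_fold_desc (x : Int) : ∀ (j : Nat) (sums : List (PySem.Set Int)), j < sums.length →
    ((pvDesc j).foldl (pvDpBody x) sums).length = sums.length ∧
    (∀ i : Nat, (i = 0 ∨ j < i) →
      ((pvDesc j).foldl (pvDpBody x) sums).getD i [] = sums.getD i []) ∧
    (∀ i : Nat, 1 ≤ i → i ≤ j → ∀ v : Int,
      v ∈ ((pvDesc j).foldl (pvDpBody x) sums).getD i [] ↔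
        (v ∈ sums.getD i [] ∨ ∃ w ∈ sums.getD (i - 1) [], v = w + x)) := by
  intro j
  induction j with
  | zero =>
    intro sums _
    exact ⟨rfl, fun i _ => rfl, fun i h1 h2 v => by omega⟩
  | succ j ih =>
    intro sums hlen
    have hjlt : j + 1 < sums.length := hlen
    -- the first iteration handles k = j, writing index j + 1
    set s' := pvDpBody x sums (j : Int) with hs'
    have htn : ((j : Int)).toNat = j := Int.toNat_natCast j
    have hslen : s'.length = sums.length := by
      rw [hs', pvDpBody]
      split
      · rfl
      · simp [List.length_set]
    have hget : ∀ i : Nat, i ≠ j + 1 → s'.getD i [] = sums.getD i [] := by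
      intro i hi
      rw [hs', pvDpBody]
      split
      · rfl
      · simp only [htn, List.getD_eq_getElem?_getD, List.getElem?_set,
          if_neg (by omega : ¬ (j + 1 = i))]
    have hmem : ∀ v : Int, v ∈ s'.getD (j + 1) [] ↔
        (v ∈ sums.getD (j + 1) [] ∨ ∃ w ∈ sums.getD j [], v = w + x) := by
      intro v
      rw [hs', pvDpBody]
      simp only [htn]
      split
      · rename_i hempty
        have h9 : sums.getD j ([] : PySem.Set Int) = [] := hempty
        constructor
        · intro h; exact Or.inl h
        · rintro (h | ⟨w, hw, _⟩)
          · exact h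
          · rw [h9] at hw; exact absurd hw (List.not_mem_nil)
      · rw [List.getD_eq_getElem?_getD, List.getElem?_set,
          if_pos rfl, if_pos (by omega : j + 1 < sums.length)]
        simp only [Option.getD_some]
        rw [PySem.Set.mem_foldl_add]
        constructor
        · rintro (h | ⟨b, hb, rfl⟩)
          · exact Or.inl h
          · exact Or.inr ⟨b, hb, rfl⟩
        · rintro (h | ⟨b, hb, rfl⟩)
          · exact Or.inl h
          · exact Or.inr ⟨b, hb, rfl⟩
    have hfold : (pvDesc (j + 1)).foldl (pvDpBody x) sums = (pvDesc j).foldl (pvDpBody x) s' := rfl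
    obtain ⟨ihlen, ihget, ihmem⟩ := ih s' (by omega)
    refine ⟨by rw [hfold, ihlen, hslen], ?_, ?_⟩
    · intro i hi
      rw [hfold, ihget i (by omega), hget i (by omega)]
    · intro i h1 h2 v
      rcases Nat.lt_or_ge i (j + 1) with hlt | hge
      · rw [hfold, ihmem i h1 (by omega), hget i (by omega), hget (i - 1) (by omega)]
      · have hi : i = j + 1 := by omega
        subst hi
        rw [hfold, ihget (j + 1) (by omega), hmem v]
        simp

-- the DP invariant: sums.getD k holds exactly the size-k combination sums of the processed prefix
def pvInv (m : Nat) (p : List Int) (sums : List (PySem.Set Int)) : Prop :=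
  sums.length = m + 1 ∧ ∀ k : Nat, k ≤ m → ∀ v : Int, v ∈ sums.getD k [] ↔ pvSC p k v

lemma pvDpStep_inv (m : Nat) (p : List Int) (sums : List (PySem.Set Int)) (x : Int)
    (h : pvInv m p sums) : pvInv m (p ++ [x]) (pvDpStep m sums x) := by
  obtain ⟨hlen, hmem⟩ := h
  have hmlt : m < sums.length := by omega
  obtain ⟨flen, fget, fmem⟩ := pv_fold_desc x m sums hmlt
  rw [pvDpStep_eq]
  refine ⟨by rw [flen, hlen], ?_⟩
  intro k hk v
  rcases Nat.eq_zero_or_pos k with h0 | h1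
  · subst h0
    rw [fget 0 (Or.inl rfl), hmem 0 (by omega), pvSC_snoc]
    simp
  · rw [fmem k h1 hk, hmem k hk, pvSC_snoc]
    constructor
    · rintro (h | ⟨w, hw, rfl⟩)
      · exact Or.inl h
      · rw [hmem (k - 1) (by omega)] at hw
        exact Or.inr ⟨h1, by simpa using hw⟩
    · rintro (h | ⟨_, hw⟩)
      · exact Or.inl h
      · refine Or.inr ⟨v - x, ?_, by ring⟩
        rw [hmem (k - 1) (by omega)]
        exact hw

lemma pv_dp_all (m : Nat) : ∀ (q p : List Int) (sums : List (PySem.Set Int)),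
    pvInv m p sums → pvInv m (p ++ q) (q.foldl (pvDpStep m) sums) := by
  intro q
  induction q with
  | nil => intro p sums h; simpa using h
  | cons y ys ih =>
    intro p sums h
    have h2 := ih (p ++ [y]) (pvDpStep m sums y) (pvDpStep_inv m p sums y h)
    simp at h2; exact h2

-- A's reduce keeps the element with the largest sum; its sum is the running max of the sums
lemma pv_reduce_sum (time : Int) : ∀ (t : List (List Int)) (h : List Int),
    (t.foldl (fun a b => if time - a.sum ≤ time - b.sum then a else b) h).sum =
      (t.map List.sum).foldl max h.sum := by
  intro t
  induction t with
  | nil => intro h; rfl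
  | cons b t ih =>
    intro h
    simp only [List.foldl_cons, List.map_cons]
    rw [ih]
    congr 1
    split_ifs with hc
    · omega
    · omega

-- per-n bridge: A's combination call equals B's max-over-feasible step
lemma pv_bridge (songs : List Int) (time : Int) (m : Nat) (sumsF : List (PySem.Set Int))
    (hinv : pvInv m songs sumsF) (n : Nat) (hn : n ≤ m) (ans : Int) :
    pvCombination songs time n ans =
      (match PySem.List.max? ((sumsF.getD n PySem.Set.empty).filter (fun v => decide (v ≤ time)))
          (fun v => v) with
      | none => ans
      | some mx => time - mx) := by
  obtain ⟨hlen, hmem⟩ := hinv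
  have hfeas : ∀ v : Int,
      v ∈ ((sumsF.getD n PySem.Set.empty).filter (fun v => decide (v ≤ time))) ↔
        (pvSC songs n v ∧ v ≤ time) := by
    intro v
    rw [List.mem_filter]
    constructor
    · rintro ⟨hv, hd⟩
      exact ⟨(hmem n hn v).mp hv, of_decide_eq_true hd⟩
    · rintro ⟨hv, hle⟩
      exact ⟨(hmem n hn v).mpr hv, decide_eq_true hle⟩
  have hLmap : ∀ v : Int,
      v ∈ (((PySem.List.combinations songs n).filter (fun c => decide (c.sum ≤ time))).map List.sum) ↔
        (pvSC songs n v ∧ v ≤ time) := by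
    intro v
    simp only [List.mem_map, List.mem_filter]
    constructor
    · rintro ⟨c, ⟨hc, hd⟩, rfl⟩
      exact ⟨List.mem_map_of_mem hc, of_decide_eq_true hd⟩
    · rintro ⟨hv, hle⟩
      rcases List.mem_map.mp hv with ⟨c, hc, rfl⟩
      exact ⟨c, ⟨hc, decide_eq_true hle⟩, rfl⟩
  rw [pvCombination]
  rcases hL : (PySem.List.combinations songs n).filter (fun c => decide (c.sum ≤ time)) with _ | ⟨hd, tl⟩
  · -- A's filtered list is empty, hence B's feasible list is empty too
    have hfe : ((sumsF.getD n PySem.Set.empty).filter (fun v => decide (v ≤ time))) = [] := by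
      rw [List.eq_nil_iff_forall_not_mem]
      intro v hv
      have := (hfeas v).mp hv
      have h2 := (hLmap v).mpr this
      rw [hL] at h2
      simp at h2
    rw [hL, hfe]
    simp [PySem.List.max?]
  · -- nonempty: both sides are time minus the maximal feasible sum
    have hM := pv_reduce_sum time tl hd
    set M := (tl.map List.sum).foldl max hd.sum with hMdef
    have hMmem : M ∈ (hd :: tl).map List.sum := by
      rcases PySem.List.foldl_max_mem (tl.map List.sum) hd.sum with h | h
      · rw [hMdef, h]; exact List.mem_cons_self
      · rw [List.map_cons]; exact List.mem_cons_of_mem _ h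
    have hMfeas : M ∈ ((sumsF.getD n PySem.Set.empty).filter (fun v => decide (v ≤ time))) := by
      rw [hfeas]
      rw [← hLmap]
      rw [hL]
      exact hMmem
    rcases hmx : PySem.List.max? ((sumsF.getD n PySem.Set.empty).filter (fun v => decide (v ≤ time))) (fun v => v) with _ | mx
    · rw [PySem.List.max?_eq_none_iff] at hmx
      rw [hmx] at hMfeas
      exact absurd hMfeas (List.not_mem_nil)
    · have hmx_mem := PySem.List.max?_mem hmx
      have hmx_max := PySem.List.max?_isMax hmx
      have h1 : mx ≤ M := by
        have := (hfeas mx).mp hmx_mem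
        have h2 := (hLmap mx).mpr this
        rw [hL] at h2
        rcases List.mem_map.mp h2 with ⟨c, hc, rfl⟩
        rcases List.mem_cons.mp hc with rfl | hc'
        · exact (PySem.List.le_foldl_max (tl.map List.sum) c.sum).1
        · exact (PySem.List.le_foldl_max (tl.map List.sum) hd.sum).2 _ (List.mem_map_of_mem hc')
      have h2 : M ≤ mx := hmx_max M hMfeas
      have hMeq : M = mx := le_antisymm h2 h1
      rw [hL]
      show time - _ = time - mx
      rw [hM, hMeq]

lemma pvLoopA_zero (songs : List Int) (time : Int) : ∀ (fuel : Nat) (n : Nat),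
    pvLoopA songs time fuel 0 n = 0 := by
  intro fuel n
  cases fuel with
  | zero => rfl
  | succ f => simp [pvLoopA]

lemma pv_loops_eq (songs : List Int) (time : Int) (m : Nat) (sumsF : List (PySem.Set Int))
    (hm : m = songs.length) (hinv : pvInv m songs sumsF) :
    ∀ (r : Nat) (n : Nat) (ans : Int), n + r = m + 1 → ans ≠ 0 →
      pvLoopA songs time (r + 1) ans n = pvNLoopB time sumsF r ans n := by
  intro r
  induction r with
  | zero =>
    intro n ans hn hans
    rw [pvLoopA, pvNLoopB]
    rw [if_neg]
    rintro ⟨-, hle⟩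
    omega
  | succ r ih =>
    intro n ans hn hans
    have hnle : n ≤ m := by omega
    rw [pvLoopA, if_pos ⟨hans, by omega⟩]
    rw [pv_bridge songs time m sumsF hinv n hnle ans]
    rw [pvNLoopB]
    rcases hmx : PySem.List.max? ((sumsF.getD n PySem.Set.empty).filter (fun v => decide (v ≤ time))) (fun v => v) with _ | mx
    · show pvLoopA songs time (r + 1) ans (n + 1) = pvNLoopB time sumsF r ans (n + 1)
      exact ih (n + 1) ans (by omega) hans
    · show pvLoopA songs time (r + 1) (time - mx) (n + 1) =
        if time - mx = 0 then time - mx else pvNLoopB time sumsF r (time - mx) (n + 1)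
      by_cases hz : time - mx = 0
      · rw [if_pos hz, hz]
        exact pvLoopA_zero songs time (r + 1) (n + 1)
      · rw [if_neg hz]
        exact ih (n + 1) (time - mx) (by omega) hz

-- ===== VERDICT (by name: the statement is the Claim_ definition above) =====
theorem awaitingtime_spec : Claim_equal_awaitingtime := by
  intro songs time _
  unfold Spec_awaitingtime awaitingtime awaitingtime_alt
  by_cases h0 : songs.length = 0
  · simp [h0]
  · simp only [h0, if_false]
    by_cases h1 : songs.sum = time ∨ time ∈ songs
    · simp [h1]
    · simp only [h1, if_false]
      by_cases h2 : songs.sum < time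
      · simp [h2]
      · simp only [h2, if_false]
        -- remaining case: sum(songs) > time; both run their n-loop
        set m := songs.length with hm
        have hm1 : 1 ≤ m := by omega
        set sums0 : List (PySem.Set Int) := List.replicate (m + 1) PySem.Set.empty with hs0
        set sums1 := sums0.set 0 (PySem.Set.add (sums0.getD 0 PySem.Set.empty) 0) with hs1
        have hinv1 : pvInv m [] sums1 := by
          refine ⟨by simp [hs1, hs0, List.length_set], ?_⟩
          intro k hk v
          cases k with
          | zero =>
            have : sums1.getD 0 [] = [0] := by
              rw [hs1, List.getD_eq_getElem?_getD, List.getElem?_set, if_pos rfl,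
                if_pos (by simp [hs0] : 0 < sums0.length)]
              rfl
            rw [this]
            simp [pvSC, PySem.List.combinations_zero]
          | succ k' =>
            have : sums1.getD (k' + 1) [] = [] := by
              rw [hs1, List.getD_eq_getElem?_getD, List.getElem?_set,
                if_neg (by omega : ¬ (0 = k' + 1)), hs0, List.getElem?_replicate]
              split <;> rfl
            rw [this]
            simp [pvSC, PySem.List.combinations_nil_succ]
        have hinvF : pvInv m songs (songs.foldl (pvDpStep m) sums1) := by
          have := pv_dp_all m songs [] sums1 hinv1
          simpa using this
        exact pv_loops_eq songs time m (songs.foldl (pvDpStep m) sums1) hm hinvF m 1 (-1)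
          (by omega) (by norm_num)
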